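-- pv_equiv track=rewrite | github.com/Stake2/Python | Modules/Global_Functions/__init__.py | Return_Setting_Name_And_Value
-- ===== SOURCE A (Python) =====
-- def Return_Setting_Name_And_Value(setting_line, setting_splitter):
-- 	split = setting_line.split(setting_splitter)
--
-- 	setting = split[0]
--
-- 	value = split[setting_line.count(setting_splitter)]
--
-- 	if setting_line.count(setting_splitter) == 2:
-- 		value = split[1] + setting_splitter + value
--
-- 	if setting_line.count(setting_splitter) >= 3:
-- 		split.pop(0)
-- 		value = ""
--
-- 		for item in split:
-- 			value += item
--
-- 			if item != split[-1]:
-- 				value += setting_splitter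
--
-- 	return [setting, value]
-- ===== SOURCE B (Python) =====
-- def Return_Setting_Name_And_Value(setting_line, setting_splitter):
--     parts = setting_line.split(setting_splitter)
--     if len(parts) == 1:
--         return [setting_line, setting_line]
--     return [parts[0], setting_splitter.join(parts[1:])]
-- ===== Notes on version B (the rewrite author's own statement) =====
-- stated objective: simpler
-- what changed: B replaces A's count-indexed lookup, three-way branch ladder and manual splitter-reinserting reassembly loop by a single split followed by one join of the tail pieces.
-- intended difference: On lines with at least 3 splitter occurrences whose last chunk also occurs among the middle chunks, A's reassembly loop drops the splitter after every middle chunk equal to the last one (A('a,b,c,b',',') = ['a','bc,b']), while B returns everything after the first splitter verbatim (['a','b,c,b']), which is the intended name/value split. — e.g. on Return_Setting_Name_And_Value("a,b,c,b", ","): A returns ["a", "bc,b"], B returns ["a", "b,c,b"]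
import Mathlib
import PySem

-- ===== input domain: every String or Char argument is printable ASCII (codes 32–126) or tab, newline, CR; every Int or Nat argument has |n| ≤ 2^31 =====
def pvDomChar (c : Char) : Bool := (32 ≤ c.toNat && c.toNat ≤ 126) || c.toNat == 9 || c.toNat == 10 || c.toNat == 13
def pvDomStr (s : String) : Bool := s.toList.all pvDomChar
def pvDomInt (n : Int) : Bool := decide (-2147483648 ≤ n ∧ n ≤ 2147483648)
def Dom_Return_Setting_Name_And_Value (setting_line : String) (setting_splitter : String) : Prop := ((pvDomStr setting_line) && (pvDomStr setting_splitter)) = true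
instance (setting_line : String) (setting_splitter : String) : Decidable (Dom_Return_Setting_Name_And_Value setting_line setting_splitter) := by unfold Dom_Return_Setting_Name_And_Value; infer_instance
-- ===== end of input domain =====

-- B replaces A's count-indexed branch ladder and manual reassembly loop by one split and one
-- join of the tail pieces (objective: simpler); return value only, neither mutates its arguments.

-- ===== PORT A =====
def Return_Setting_Name_And_Value (setting_line : String) (setting_splitter : String) : List String :=
  -- split = setting_line.split(setting_splitter)  (raises ValueError iff the splitter is "", excluded by Pre_)
  let split := (PySem.Str.split? setting_line setting_splitter).getD []
  let setting := (PySem.List.pyGet? split 0).getD ""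
  let value := (PySem.List.pyGet? split ((PySem.Str.count setting_line setting_splitter : Int))).getD ""
  let value := if PySem.Str.count setting_line setting_splitter = 2 then
      ((PySem.List.pyGet? split 1).getD "") ++ setting_splitter ++ value
    else value
  if 3 ≤ PySem.Str.count setting_line setting_splitter then
    -- split.pop(0)
    let split := (match PySem.List.pop? split 0 with | some (_, rest) => rest | none => [])
    -- value = ""; for item in split: value += item; if item != split[-1]: value += setting_splitter
    let value := split.foldl (fun v item =>
      let v := v ++ item
      if item ≠ (PySem.List.pyGet? split (-1)).getD "" then v ++ setting_splitter else v) ""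
    [setting, value]
  else
    [setting, value]

-- ===== PORT B =====
def Return_Setting_Name_And_Value_alt (setting_line : String) (setting_splitter : String) : List String :=
  let parts := (PySem.Str.split? setting_line setting_splitter).getD []
  if parts.length = 1 then
    [setting_line, setting_line]
  else
    [(PySem.List.pyGet? parts 0).getD "",
     PySem.Str.join setting_splitter (PySem.List.slice parts (some 1) none)]

-- ===== PRECONDITION & SPEC =====
-- Pre_ excludes only setting_splitter = "", on which both A and B raise ValueError (str.split with empty separator).
def Pre_Return_Setting_Name_And_Value (setting_line : String) (setting_splitter : String) : Prop :=
  setting_splitter ≠ ""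
instance (setting_line : String) (setting_splitter : String) : Decidable (Pre_Return_Setting_Name_And_Value setting_line setting_splitter) := by unfold Pre_Return_Setting_Name_And_Value; infer_instance
def pvWitness_Return_Setting_Name_And_Value : String × String := ("name=value", "=")

-- On lines with at least 3 occurrences of the splitter whose last chunk also occurs among the middle
-- chunks, A's reassembly loop silently drops the splitter after every middle chunk equal to the last
-- one (e.g. A("a,b,c,b", ",") = ['a', 'bc,b']), while B returns everything after the first splitter
-- verbatim (['a', 'b,c,b']), which is the intended name/value split.
def D_Return_Setting_Name_And_Value (setting_line : String) (setting_splitter : String) : Prop :=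
  4 ≤ (PySem.Chars.splitOn setting_line.toList setting_splitter.toList).length ∧
  (PySem.Chars.splitOn setting_line.toList setting_splitter.toList).getLastD [] ∈
    (PySem.Chars.splitOn setting_line.toList setting_splitter.toList).tail.dropLast
instance (setting_line : String) (setting_splitter : String) : Decidable (D_Return_Setting_Name_And_Value setting_line setting_splitter) := by unfold D_Return_Setting_Name_And_Value; infer_instance

def Spec_Return_Setting_Name_And_Value (setting_line : String) (setting_splitter : String) (out : List String) : Prop := ¬ D_Return_Setting_Name_And_Value setting_line setting_splitter → out = Return_Setting_Name_And_Value_alt setting_line setting_splitter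
instance (setting_line : String) (setting_splitter : String) (out : List String) : Decidable (Spec_Return_Setting_Name_And_Value setting_line setting_splitter out) := by unfold Spec_Return_Setting_Name_And_Value; infer_instance

def pvDiffWitness_Return_Setting_Name_And_Value : String × String := ("a,b,c,b", ",")
def pvDiffWitnessOut_Return_Setting_Name_And_Value : (List String) × (List String) :=
  (["a", "bc,b"], ["a", "b,c,b"])

-- ===== CLAIM (what is proved, stated in full; the proofs are below) =====
def Claim_unchanged_Return_Setting_Name_And_Value : Prop := ∀ (setting_line : String) (setting_splitter : String), Dom_Return_Setting_Name_And_Value setting_line setting_splitter → Pre_Return_Setting_Name_And_Value setting_line setting_splitter → Spec_Return_Setting_Name_And_Value setting_line setting_splitter (Return_Setting_Name_And_Value setting_line setting_splitter)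
def Claim_changed_Return_Setting_Name_And_Value : Prop := Dom_Return_Setting_Name_And_Value (pvDiffWitness_Return_Setting_Name_And_Value.1) (pvDiffWitness_Return_Setting_Name_And_Value.2) ∧ Pre_Return_Setting_Name_And_Value (pvDiffWitness_Return_Setting_Name_And_Value.1) (pvDiffWitness_Return_Setting_Name_And_Value.2) ∧ D_Return_Setting_Name_And_Value (pvDiffWitness_Return_Setting_Name_And_Value.1) (pvDiffWitness_Return_Setting_Name_And_Value.2) ∧ Return_Setting_Name_And_Value (pvDiffWitness_Return_Setting_Name_And_Value.1) (pvDiffWitness_Return_Setting_Name_And_Value.2) = pvDiffWitnessOut_Return_Setting_Name_And_Value.1 ∧ Return_Setting_Name_And_Value_alt (pvDiffWitness_Return_Setting_Name_And_Value.1) (pvDiffWitness_Return_Setting_Name_And_Value.2) = pvDiffWitnessOut_Return_Setting_Name_And_Value.2 ∧ pvDiffWitnessOut_Return_Setting_Name_And_Value.1 ≠ pvDiffWitnessOut_Return_Setting_Name_And_Value.2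
def Claim_exact_Return_Setting_Name_And_Value : Prop := ∀ (setting_line : String) (setting_splitter : String), Dom_Return_Setting_Name_And_Value setting_line setting_splitter → Pre_Return_Setting_Name_And_Value setting_line setting_splitter → D_Return_Setting_Name_And_Value setting_line setting_splitter → Return_Setting_Name_And_Value setting_line setting_splitter ≠ Return_Setting_Name_And_Value_alt setting_line setting_splitter

-- ===== LEMMAS AND PROOFS =====

-- unfolding equations for the fuel-driven PySem primitives
theorem pv_count_go_nil (sub : List Char) (f n : Nat) : PySem.Chars.count.go sub f [] n = n := by
  cases f <;> simp [PySem.Chars.count.go]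

theorem pv_count_go_cons (sub : List Char) (f : Nat) (c : Char) (rest : List Char) (n : Nat) :
  PySem.Chars.count.go sub (f+1) (c::rest) n =
    if sub.isPrefixOf (c::rest) then PySem.Chars.count.go sub f (List.drop sub.length (c::rest)) (n+1)
    else PySem.Chars.count.go sub f rest n := by simp [PySem.Chars.count.go]

theorem pv_split_go_nil (sep : List Char) (f : Nat) (cur : List Char) (acc : List (List Char)) :
  PySem.Chars.splitOn.go sep (f+1) [] cur acc = (cur.reverse :: acc).reverse := by
  simp [PySem.Chars.splitOn.go]

theorem pv_split_go_cons (sep : List Char) (f : Nat) (c : Char) (rest cur : List Char) (acc : List (List Char)) :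
  PySem.Chars.splitOn.go sep (f+1) (c::rest) cur acc =
    if sep.isPrefixOf (c::rest) then PySem.Chars.splitOn.go sep f (List.drop sep.length (c::rest)) [] (cur.reverse :: acc)
    else PySem.Chars.splitOn.go sep f rest (c::cur) acc := by simp [PySem.Chars.splitOn.go]

theorem pv_count_go_shift (sub : List Char) : ∀ (fuel : Nat) (l : List Char) (n : Nat),
    PySem.Chars.count.go sub fuel l n = PySem.Chars.count.go sub fuel l 0 + n := by
  intro fuel
  induction fuel with
  | zero => intro l n; cases l <;> simp [PySem.Chars.count.go]
  | succ f ih =>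
    intro l n
    cases l with
    | nil => simp [pv_count_go_nil]
    | cons c rest =>
      rw [pv_count_go_cons, pv_count_go_cons]
      split_ifs with h
      · rw [ih _ (n+1), ih _ 1]; omega
      · exact ih rest n

theorem pv_count_go_fuel (sub : List Char) (hsub : sub ≠ []) : ∀ (f1 f2 : Nat) (l : List Char),
    l.length ≤ f1 → l.length ≤ f2 →
    PySem.Chars.count.go sub f1 l 0 = PySem.Chars.count.go sub f2 l 0 := by
  intro f1
  induction f1 with
  | zero =>
    intro f2 l h1 h2
    have : l = [] := by cases l <;> simp_all
    subst this; simp [pv_count_go_nil]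
  | succ f ih =>
    intro f2 l h1 h2
    cases l with
    | nil => simp [pv_count_go_nil]
    | cons c rest =>
      obtain ⟨f2', rfl⟩ : ∃ k, f2 = k + 1 := ⟨f2 - 1, by simp at h2; omega⟩
      rw [pv_count_go_cons, pv_count_go_cons]
      have hs : 1 ≤ sub.length := by cases sub <;> simp_all
      split_ifs with h
      · rw [pv_count_go_shift sub f _ 1, pv_count_go_shift sub f2' _ 1]
        have hd : (List.drop sub.length (c::rest)).length ≤ f := by
          simp at h1 ⊢; omega
        have hd2 : (List.drop sub.length (c::rest)).length ≤ f2' := by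
          simp at h2 ⊢; omega
        rw [ih f2' _ hd hd2]
      · exact ih f2' rest (by simp at h1; omega) (by simp at h2; omega)

theorem pv_go_len (sep : List Char) (hsep : sep ≠ []) : ∀ (fuel : Nat) (l cur : List Char) (acc : List (List Char)),
    l.length < fuel →
    (PySem.Chars.splitOn.go sep fuel l cur acc).length
      = acc.length + 1 + PySem.Chars.count.go sep l.length l 0 := by
  intro fuel
  induction fuel with
  | zero => intro l cur acc h; omega
  | succ f ih =>
    intro l cur acc h
    cases l with
    | nil => simp [pv_split_go_nil, pv_count_go_nil]
    | cons c rest =>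
      have hs : 1 ≤ sep.length := by cases sep <;> simp_all
      rw [pv_split_go_cons]
      split_ifs with hp
      · have hd : (List.drop sep.length (c::rest)).length < f := by simp at h ⊢; omega
        rw [ih _ [] _ hd]
        rw [show ((c::rest).length) = rest.length + 1 from by simp, pv_count_go_cons]
        rw [if_pos hp, pv_count_go_shift sep rest.length _ 1]
        have := pv_count_go_fuel sep hsep (List.drop sep.length (c::rest)).length rest.length
          (List.drop sep.length (c::rest)) (le_refl _) (by simp; omega)
        rw [this]; simp; omega
      · have hd : rest.length < f := by simp at h; omega
        rw [ih _ _ _ hd]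
        rw [show ((c::rest).length) = rest.length + 1 from by simp, pv_count_go_cons, if_neg hp]

theorem pv_join_snoc2 (sep a b : List Char) : ∀ xs : List (List Char),
    PySem.Chars.join sep (xs ++ [a, b]) = PySem.Chars.join sep (xs ++ [a ++ sep ++ b]) := by
  intro xs
  induction xs with
  | nil => simp [PySem.Chars.join_cons_cons, PySem.Chars.join_singleton, List.append_assoc]
  | cons x xs ih =>
    cases xs with
    | nil => simp [PySem.Chars.join_cons_cons, PySem.Chars.join_singleton, List.append_assoc]
    | cons y ys =>
      simp only [List.cons_append] at ih ⊢
      rw [PySem.Chars.join_cons_cons, PySem.Chars.join_cons_cons, ih]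

theorem pv_go_join (sep : List Char) (hsep : sep ≠ []) : ∀ (fuel : Nat) (l cur : List Char) (acc : List (List Char)),
    l.length < fuel →
    PySem.Chars.join sep (PySem.Chars.splitOn.go sep fuel l cur acc)
      = PySem.Chars.join sep (acc.reverse ++ [cur.reverse ++ l]) := by
  intro fuel
  induction fuel with
  | zero => intro l cur acc h; omega
  | succ f ih =>
    intro l cur acc h
    cases l with
    | nil => simp [pv_split_go_nil]
    | cons c rest =>
      have hs : 1 ≤ sep.length := by cases sep <;> simp_all
      rw [pv_split_go_cons]
      split_ifs with hp
      · have hd : (List.drop sep.length (c::rest)).length < f := by simp at h ⊢; omega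
        rw [ih _ _ _ hd]
        have hl : sep ++ List.drop sep.length (c::rest) = c :: rest := by
          have : sep <+: (c::rest) := by
            rw [← List.isPrefixOf_iff_prefix]; exact hp
          exact List.prefix_iff_eq_append.mp this
        have h2 := pv_join_snoc2 sep cur.reverse (List.drop sep.length (c::rest)) acc.reverse
        simp only [List.reverse_cons, List.reverse_nil, List.nil_append, List.append_assoc]
        rw [show ([cur.reverse] ++ [List.drop sep.length (c::rest)])
              = ([cur.reverse, List.drop sep.length (c::rest)] : List (List Char)) from rfl]
        rw [h2, ← hl]
        simp [List.append_assoc]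
      · have hd : rest.length < f := by simp at h; omega
        rw [ih _ _ _ hd]
        simp

theorem pv_splitOn_length (sep : List Char) (hsep : sep ≠ []) (l : List Char) :
    (PySem.Chars.splitOn l sep).length = PySem.Chars.count l sep + 1 := by
  have he : sep.isEmpty = false := by cases sep <;> simp_all
  rw [PySem.Chars.splitOn, pv_go_len sep hsep _ _ _ _ (by omega), PySem.Chars.count, he]
  simp only [Bool.false_eq_true, if_false, List.length_nil]
  omega

theorem pv_splitOn_join (sep : List Char) (hsep : sep ≠ []) (l : List Char) :
    PySem.Chars.join sep (PySem.Chars.splitOn l sep) = l := by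
  rw [PySem.Chars.splitOn, pv_go_join sep hsep _ _ _ _ (by omega)]
  simp [PySem.Chars.join_singleton]

theorem pv_str_join_singleton (sep p : String) : PySem.Str.join sep [p] = p := by
  simp [PySem.Str.join, PySem.Chars.join_singleton]

theorem pv_str_join_cons_cons (sep p q : String) (rest : List String) :
    PySem.Str.join sep (p :: q :: rest) = p ++ sep ++ PySem.Str.join sep (q :: rest) := by
  simp [PySem.Str.join, PySem.Chars.join_cons_cons, String.append_assoc]

theorem pv_fold_join (sep : String) : ∀ (l : List String) (z acc : String),
    l.getLast? = some z → (∀ x ∈ l.dropLast, x ≠ z) →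
    l.foldl (fun v item => if item ≠ z then v ++ item ++ sep else v ++ item) acc
      = acc ++ PySem.Str.join sep l := by
  intro l
  induction l with
  | nil => intro z acc h; simp at h
  | cons x l ih =>
    intro z acc hlast hne
    cases l with
    | nil =>
      simp at hlast; subst hlast
      simp [pv_str_join_singleton]
    | cons y t =>
      have hx : x ≠ z := hne x (by simp)
      have hlast' : (y::t).getLast? = some z := by
        rw [← hlast]; exact (List.getLast?_cons_cons ..).symm
      have hne' : ∀ w ∈ (y::t).dropLast, w ≠ z := by
        intro w hw; exact hne w (by simp [List.dropLast] at hw ⊢; tauto)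
      rw [List.foldl_cons, ih z _ hlast' hne', pv_str_join_cons_cons]
      simp [hx, String.append_assoc]

theorem pv_pyGet_neg_one {α : Type} (xs : List α) (hx : xs ≠ []) :
    PySem.List.pyGet? xs (-1) = xs.getLast? := by
  have h1 : 1 ≤ xs.length := by cases xs <;> simp_all
  simp [PySem.List.pyGet?, PySem.List.pyIdx?, show -(xs.length:Int) ≤ -1 from by omega]
  rw [List.getLast?_eq_getElem?]

-- both ports on a line whose split has at least four pieces
theorem pv_A_big (line sep : String) (p0 p1 p2 p3 : List Char) (t3 : List (List Char))
    (hsep : sep ≠ "") (hp : PySem.Chars.splitOn line.toList sep.toList = p0::p1::p2::p3::t3) :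
    Return_Setting_Name_And_Value line sep
      = [String.ofList p0,
         ((p1::p2::p3::t3).map String.ofList).foldl
           (fun v item => if item ≠ (((p1::p2::p3::t3).map String.ofList).getLast?.getD "")
             then v ++ item ++ sep else v ++ item) ""] := by
  have hsepC : sep.toList ≠ [] := by
    intro h; apply hsep; have := congrArg String.ofList h; simpa using this
  have hsepE : sep.toList.isEmpty = false := by cases hc : sep.toList <;> simp_all
  have hsplit : PySem.Str.split? line sep
      = some ((PySem.Chars.splitOn line.toList sep.toList).map String.ofList) := by
    simp [PySem.Str.split?, PySem.Chars.split?, hsepE]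
  have hlen := pv_splitOn_length sep.toList hsepC line.toList
  have hc : PySem.Chars.count line.toList sep.toList = t3.length + 3 := by
    rw [hp] at hlen; simp at hlen; omega
  simp only [Return_Setting_Name_And_Value, hsplit, Option.getD_some, hp, PySem.Str.count, hc,
    List.map_cons]
  rw [if_pos (by omega : 3 ≤ t3.length + 3)]
  simp only [PySem.List.pop?_zero_cons]
  rw [pv_pyGet_neg_one _ (by simp)]
  simp [PySem.List.pyGet?, PySem.List.pyIdx?, show (0:Int) ≤ (t3.length:Int)+1+1+1 from by positivity]

theorem pv_B_big (line sep : String) (p0 p1 p2 p3 : List Char) (t3 : List (List Char))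
    (hsep : sep ≠ "") (hp : PySem.Chars.splitOn line.toList sep.toList = p0::p1::p2::p3::t3) :
    Return_Setting_Name_And_Value_alt line sep
      = [String.ofList p0, PySem.Str.join sep ((p1::p2::p3::t3).map String.ofList)] := by
  have hsepC : sep.toList ≠ [] := by
    intro h; apply hsep; have := congrArg String.ofList h; simpa using this
  have hsepE : sep.toList.isEmpty = false := by cases hc : sep.toList <;> simp_all
  have hsplit : PySem.Str.split? line sep
      = some ((PySem.Chars.splitOn line.toList sep.toList).map String.ofList) := by
    simp [PySem.Str.split?, PySem.Chars.split?, hsepE]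
  simp only [Return_Setting_Name_And_Value_alt, hsplit, Option.getD_some, hp, List.map_cons]
  rw [if_neg (by simp)]
  rw [show PySem.List.slice (String.ofList p0 :: String.ofList p1 :: String.ofList p2 :: String.ofList p3 :: t3.map String.ofList) (some 1) none
        = String.ofList p1 :: String.ofList p2 :: String.ofList p3 :: t3.map String.ofList from by
      simp [PySem.List.slice_from]]
  simp [PySem.List.pyGet?, PySem.List.pyIdx?, show (0:Int) ≤ (t3.length:Int)+1+1+1 from by positivity]

theorem pv_main : ∀ (line sep : String), sep ≠ "" →
    ¬ D_Return_Setting_Name_And_Value line sep →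
    Return_Setting_Name_And_Value line sep = Return_Setting_Name_And_Value_alt line sep := by
  intro line sep hsep hnD
  have hsepC : sep.toList ≠ [] := by
    intro h; apply hsep; have := congrArg String.ofList h; simpa using this
  have hsepE : sep.toList.isEmpty = false := by cases hc : sep.toList <;> simp_all
  have hsplit : PySem.Str.split? line sep
      = some ((PySem.Chars.splitOn line.toList sep.toList).map String.ofList) := by
    simp [PySem.Str.split?, PySem.Chars.split?, hsepE]
  have hlen := pv_splitOn_length sep.toList hsepC line.toList
  have hjoin := pv_splitOn_join sep.toList hsepC line.toList
  rcases hp : PySem.Chars.splitOn line.toList sep.toList with _ | ⟨p0, t0⟩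
  · rw [hp] at hlen; simp at hlen
  rcases t0 with _ | ⟨p1, t1⟩
  · -- one piece: no occurrence, A returns [p0,p0], B returns [line,line], p0 = line
    have hc : PySem.Chars.count line.toList sep.toList = 0 := by
      rw [hp] at hlen; simp at hlen; omega
    rw [hp] at hjoin
    have hp0 : String.ofList p0 = line := by
      rw [PySem.Chars.join_singleton] at hjoin; rw [hjoin]; simp
    simp [Return_Setting_Name_And_Value, Return_Setting_Name_And_Value_alt, hsplit, hp,
      PySem.Str.count, hc, PySem.List.pyGet?, PySem.List.pyIdx?, hp0]
  rcases t1 with _ | ⟨p2, t2⟩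
  · -- two pieces, count = 1
    have hc : PySem.Chars.count line.toList sep.toList = 1 := by
      rw [hp] at hlen; simp at hlen; omega
    simp [Return_Setting_Name_And_Value, Return_Setting_Name_And_Value_alt, hsplit, hp,
      PySem.Str.count, hc, PySem.List.pyGet?, PySem.List.pyIdx?,
      PySem.List.slice_from, pv_str_join_singleton]
  rcases t2 with _ | ⟨p3, t3⟩
  · -- three pieces, count = 2
    have hc : PySem.Chars.count line.toList sep.toList = 2 := by
      rw [hp] at hlen; simp at hlen; omega
    simp [Return_Setting_Name_And_Value, Return_Setting_Name_And_Value_alt, hsplit, hp,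
      PySem.Str.count, hc, PySem.List.pyGet?, PySem.List.pyIdx?,
      PySem.List.slice_from, pv_str_join_cons_cons, pv_str_join_singleton]
  · -- at least four pieces, count ≥ 3
    rw [pv_A_big line sep p0 p1 p2 p3 t3 hsep hp, pv_B_big line sep p0 p1 p2 p3 t3 hsep hp]
    set tl : List String := String.ofList p1 :: String.ofList p2 :: String.ofList p3 :: t3.map String.ofList with htl
    have htlne : tl ≠ [] := by simp [htl]
    obtain ⟨z, hz⟩ : ∃ z, tl.getLast? = some z := ⟨tl.getLast htlne, List.getLast?_eq_some_getLast htlne⟩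
    have hznotin : ∀ x ∈ tl.dropLast, x ≠ z := by
      intro x hx hxz
      -- move the duplicate back to the character level and contradict hnD
      have htlm : tl = (p1::p2::p3::t3).map String.ofList := by simp [htl]
      rw [htlm, ← List.map_dropLast] at hx
      obtain ⟨xc, hxc, hofl⟩ := List.mem_map.mp hx
      apply hnD
      refine ⟨by rw [hp]; simp, ?_⟩
      rw [hp]
      have hzc : ((p1::p2::p3::t3) : List (List Char)).getLast? = some ((p0::p1::p2::p3::t3).getLastD []) := by
        rw [List.getLastD_eq_getLast?,
          show ((p0::p1::p2::p3::t3) : List (List Char)).getLast? = (p1::p2::p3::t3).getLast? from List.getLast?_cons_cons ..]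
        cases hgl : ((p1::p2::p3::t3) : List (List Char)).getLast? with
        | none => simp [List.getLast?_eq_none_iff] at hgl
        | some w => rfl
      have hzs : z = String.ofList ((p0::p1::p2::p3::t3).getLastD []) := by
        have := hz
        rw [htlm, List.getLast?_map, hzc] at this
        simpa using this.symm
      have hxceq : xc = (p0::p1::p2::p3::t3).getLastD [] := by
        have h0 : String.ofList xc = String.ofList ((p0::p1::p2::p3::t3).getLastD []) := by
          rw [hofl, hxz, hzs]
        have := congrArg String.toList h0
        simpa using this
      simpa [List.tail, hxceq] using hxc
    have hfold := pv_fold_join sep tl z "" hz hznotin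
    simp only [List.map_cons, ← htl, hz, Option.getD_some]
    have hfold2 : List.foldl (fun v item => if item ≠ z then v ++ item ++ sep else v ++ item) "" tl
        = PySem.Str.join sep tl := by
      rw [hfold]; simp
    exact congrArg (fun v => [String.ofList p0, v]) hfold2

theorem pv_fold_len (sep z : String) : ∀ (l : List String) (acc : String),
    (l.foldl (fun v item => if item ≠ z then v ++ item ++ sep else v ++ item) acc).length
      = acc.length + (l.map String.length).sum + sep.length * (l.countP (fun x => x != z)) := by
  intro l
  induction l with
  | nil => intro acc; simp
  | cons x l ih =>
    intro acc
    rw [List.foldl_cons]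
    by_cases hx : x ≠ z
    · rw [if_pos hx, ih]
      simp [List.countP_cons, hx, Nat.mul_add, String.length_append]
      ring
    · rw [if_neg hx, ih]
      simp at hx
      simp [hx, String.length_append]
      ring

theorem pv_join_len (sep : String) : ∀ (l : List String), l ≠ [] →
    (PySem.Str.join sep l).length = (l.map String.length).sum + sep.length * (l.length - 1) := by
  intro l
  induction l with
  | nil => intro h; simp at h
  | cons x l ih =>
    intro _
    cases l with
    | nil => simp [pv_str_join_singleton]
    | cons y t =>
      rw [pv_str_join_cons_cons]
      simp only [String.length_append, List.map_cons, List.sum_cons, ih (by simp)]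
      rw [show (y::t).length - 1 = t.length from by simp,
          show ((x::y::t).length - 1) = t.length + 1 from by simp, Nat.mul_add, Nat.mul_one]
      omega

-- ===== VERDICT (by name: the statement is the Claim_ definition above) =====
theorem Return_Setting_Name_And_Value_spec : Claim_unchanged_Return_Setting_Name_And_Value := by
  intro line sep _ hPre hnD
  exact (pv_main line sep hPre hnD).symm ▸ rfl

theorem Return_Setting_Name_And_Value_changed : Claim_changed_Return_Setting_Name_And_Value := by
  unfold Claim_changed_Return_Setting_Name_And_Value; decide

theorem Return_Setting_Name_And_Value_tight : Claim_exact_Return_Setting_Name_And_Value := by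
  intro line sep _ hPre hD
  obtain ⟨hlen4, hmem⟩ := hD
  have hsepC : sep.toList ≠ [] := by
    intro h; apply hPre; have := congrArg String.ofList h; simpa using this
  have hsepE : sep.toList.isEmpty = false := by cases hc : sep.toList <;> simp_all
  have hsplit : PySem.Str.split? line sep
      = some ((PySem.Chars.splitOn line.toList sep.toList).map String.ofList) := by
    simp [PySem.Str.split?, PySem.Chars.split?, hsepE]
  rcases hp : PySem.Chars.splitOn line.toList sep.toList with _ | ⟨p0, t0⟩ <;> rw [hp] at hlen4 hmem
  · simp at hlen4
  rcases t0 with _ | ⟨p1, t1⟩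
  · simp at hlen4
  rcases t1 with _ | ⟨p2, t2⟩
  · simp at hlen4
  rcases t2 with _ | ⟨p3, t3⟩
  · simp at hlen4
  rw [pv_A_big line sep p0 p1 p2 p3 t3 hPre hp, pv_B_big line sep p0 p1 p2 p3 t3 hPre hp]
  set tl : List String := String.ofList p1 :: String.ofList p2 :: String.ofList p3 :: t3.map String.ofList with htl
  have htlne : tl ≠ [] := by simp [htl]
  set z : String := tl.getLast?.getD "" with hzdef
  -- the membership hypothesis, transported to tl and z
  have htlm : tl = (p1::p2::p3::t3).map String.ofList := by simp [htl]
  have hzc : ((p1::p2::p3::t3) : List (List Char)).getLast? = some ((p0::p1::p2::p3::t3).getLastD []) := by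
    rw [List.getLastD_eq_getLast?,
      show ((p0::p1::p2::p3::t3) : List (List Char)).getLast? = (p1::p2::p3::t3).getLast? from List.getLast?_cons_cons ..]
    cases hgl : ((p1::p2::p3::t3) : List (List Char)).getLast? with
    | none => simp [List.getLast?_eq_none_iff] at hgl
    | some w => rfl
  have hzs : z = String.ofList ((p0::p1::p2::p3::t3).getLastD []) := by
    rw [hzdef, htlm, List.getLast?_map, hzc]; rfl
  have hmem' : z ∈ tl.dropLast := by
    rw [htlm, ← List.map_dropLast]
    exact List.mem_map.mpr ⟨_, hmem, hzs.symm⟩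
  have hzlast : tl.getLast htlne = z := by
    rw [hzdef, List.getLast?_eq_some_getLast htlne]; rfl
  -- z occurs at least twice in tl
  have hcount2 : 2 ≤ tl.count z := by
    have hsplittl : tl.dropLast ++ [tl.getLast htlne] = tl := List.dropLast_append_getLast htlne
    calc 2 = 1 + 1 := rfl
    _ ≤ tl.dropLast.count z + [tl.getLast htlne].count z := by
        have h1 : 1 ≤ tl.dropLast.count z := List.one_le_count_iff.mpr hmem'
        have h2 : ([tl.getLast htlne].count z) = 1 := by simp [hzlast]
        omega
    _ = (tl.dropLast ++ [tl.getLast htlne]).count z := (List.count_append ..).symm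
    _ = tl.count z := by rw [hsplittl]
  -- strict length gap on the second component
  have hcnt : tl.countP (fun x => x != z) + tl.count z = tl.length := by
    have h1 := List.length_eq_countP_add_countP (p := fun x => x != z) (l := tl)
    have hswap : tl.countP (fun a => decide ¬((a != z) = true)) = tl.countP (fun x => x == z) := by
      apply List.countP_congr; intro a _; simp [bne]
    have hc : tl.count z = tl.countP (fun x => x == z) := by
      simp [List.count_eq_countP]
    rw [hc]
    omega
  have hsep1 : 1 ≤ sep.length := by
    have hq : sep.length = sep.toList.length := by simp
    rcases hc : sep.toList with _ | ⟨c, cs⟩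
    · exact absurd (by have := congrArg String.ofList hc; simpa using this) hPre
    · rw [hq, hc]; simp
  have htllen : 3 ≤ tl.length := by simp [htl]
  have hlt : sep.length * (tl.countP (fun x => x != z)) < sep.length * (tl.length - 1) := by
    exact mul_lt_mul_of_pos_left (by omega) (by omega)
  intro hEq
  have hsnd : (tl.foldl (fun v item => if item ≠ z then v ++ item ++ sep else v ++ item) "")
      = PySem.Str.join sep tl := by
    have h2 := congrArg (fun l => l[1]?) hEq
    simpa [htl] using h2
  have hL := congrArg String.length hsnd
  rw [pv_fold_len, pv_join_len sep tl htlne] at hL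
  rw [show ("" : String).length = 0 from rfl] at hL
  omega
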